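-- pv_equiv track=rewrite | github.com/24f2005461/TDS-P2 | app/browser.py | _extract_question_and_instructions
-- ===== SOURCE A (Python) =====
-- from typing import AsyncGenerator, Iterable, List, Optional, Sequence, cast
--
-- def _extract_question_and_instructions(
--     text: str,
-- ) -> tuple[Optional[str], Optional[str]]:
--     """
--     Attempt to isolate the primary question/instruction block.
--
--     Heuristics:
--     - Look for lines starting with 'Q' or 'Question'
--     - Extract paragraphs mentioning 'Post your answer' or 'Submit'
--     """
--     lines = [line.strip() for line in text.splitlines() if line.strip()]
--     question = None
--     instructions = None
--
--     for line in lines: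
--         lower = line.lower()
--         if question is None and (lower.startswith("q") or "question" in lower):
--             question = line
--         if instructions is None and (
--             "post your answer" in lower
--             or "submit" in lower
--             or "payload" in lower
--             or "answer" in lower
--             and "http" in lower
--         ):
--             instructions = line
--         if question and instructions:
--             break
--
--     return question, instructions
-- ===== SOURCE B (Python) =====
-- def _extract_question_and_instructions(text):
--     """Two independent first-match scans instead of one fused stateful loop."""
--     lines = [line.strip() for line in text.splitlines() if line.strip()]
--
--     def is_question(line):
--         lower = line.lower()
--         return lower.startswith("q") or "question" in lower
--
--     def is_instruction(line):
--         lower = line.lower()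
--         return (
--             "post your answer" in lower
--             or "submit" in lower
--             or "payload" in lower
--             or ("answer" in lower and "http" in lower)
--         )
--
--     question = next((l for l in lines if is_question(l)), None)
--     instructions = next((l for l in lines if is_instruction(l)), None)
--     return question, instructions
-- ===== Notes on version B (the rewrite author's own statement) =====
-- stated objective: idiomatic
-- what changed: Replaced the single fused early-exit loop carrying two Option states with two independent first-match scans (next(...) over generator expressions), one per field.
import Mathlib
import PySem

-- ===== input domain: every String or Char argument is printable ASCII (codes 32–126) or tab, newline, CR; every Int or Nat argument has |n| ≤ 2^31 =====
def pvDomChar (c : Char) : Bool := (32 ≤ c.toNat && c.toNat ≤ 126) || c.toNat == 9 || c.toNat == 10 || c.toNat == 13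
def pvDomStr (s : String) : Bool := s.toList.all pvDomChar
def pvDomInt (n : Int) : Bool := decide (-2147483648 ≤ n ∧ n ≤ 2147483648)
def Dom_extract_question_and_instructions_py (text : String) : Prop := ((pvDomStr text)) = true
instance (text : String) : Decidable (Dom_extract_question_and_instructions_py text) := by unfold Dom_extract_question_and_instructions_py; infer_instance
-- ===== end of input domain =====

-- B replaces A's fused early-exit loop (two Option accumulators, break when both set)
-- with two independent first-match scans over the same filtered line list (idiomatic).


-- ===== PORT A =====
-- Python truthiness of an Optional[str]: non-None and nonempty
def pvTruthyA (o : Option String) : Bool :=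
  match o with
  | none => false
  | some s => s ≠ ""

-- the fused loop of A, carrying both accumulators, with the 'break'
def pvLoopA : List String → Option String → Option String → Option String × Option String
  | [], q, i => (q, i)
  | line :: rest, q, i =>
    let lower := PySem.Str.lower line
    let q' := if q.isNone && (PySem.Str.startswith lower "q" || PySem.Str.isIn "question" lower)
              then some line else q
    let i' := if i.isNone && (PySem.Str.isIn "post your answer" lower
                || PySem.Str.isIn "submit" lower
                || PySem.Str.isIn "payload" lower
                || (PySem.Str.isIn "answer" lower && PySem.Str.isIn "http" lower))
              then some line else i
    if pvTruthyA q' && pvTruthyA i' then (q', i') else pvLoopA rest q' i'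

def extract_question_and_instructions_py (text : String) : Option String × Option String :=
  let lines := ((PySem.Str.splitlines text).filter
                  (fun line => PySem.Str.strip line ≠ "")).map PySem.Str.strip
  pvLoopA lines none none

-- ===== PORT B =====
def pvIsQuestionB (line : String) : Bool :=
  let lower := PySem.Str.lower line
  PySem.Str.startswith lower "q" || PySem.Str.isIn "question" lower

def pvIsInstructionB (line : String) : Bool :=
  let lower := PySem.Str.lower line
  PySem.Str.isIn "post your answer" lower
    || PySem.Str.isIn "submit" lower
    || PySem.Str.isIn "payload" lower
    || (PySem.Str.isIn "answer" lower && PySem.Str.isIn "http" lower)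

def extract_question_and_instructions_py_alt (text : String) : Option String × Option String :=
  let lines := ((PySem.Str.splitlines text).filter
                  (fun line => PySem.Str.strip line ≠ "")).map PySem.Str.strip
  (lines.find? pvIsQuestionB, lines.find? pvIsInstructionB)

-- ===== PRECONDITION & SPEC =====
def Spec_extract_question_and_instructions_py (text : String) (out : Option String × Option String) : Prop := out = extract_question_and_instructions_py_alt text
instance (text : String) (out : Option String × Option String) : Decidable (Spec_extract_question_and_instructions_py text out) := by unfold Spec_extract_question_and_instructions_py; infer_instance

-- ===== CLAIM (what is proved, stated in full; the proofs are below) =====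
def Claim_equal_extract_question_and_instructions_py : Prop := ∀ (text : String), Dom_extract_question_and_instructions_py text → Spec_extract_question_and_instructions_py text (extract_question_and_instructions_py text)

-- ===== LEMMAS AND PROOFS =====

-- first-component-wins combination of two Options
def pvOr (a b : Option String) : Option String :=
  match a with
  | some x => some x
  | none => b

theorem pvIsSome_of_truthy {o : Option String} (h : pvTruthyA o = true) : o.isSome := by
  cases o with
  | none => simp [pvTruthyA] at h
  | some s => rfl

theorem pvOr_of_isSome {a : Option String} (b : Option String) (h : a.isSome) :
    pvOr a b = a := by
  cases a with
  | none => simp at h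
  | some x => rfl

theorem pvStep (P : String → Bool) (q : Option String) (line : String) (rest : List String) :
    pvOr (if q.isNone && P line then some line else q) (List.find? P rest)
      = pvOr q (List.find? P (line :: rest)) := by
  cases q with
  | some x => simp [pvOr]
  | none =>
    by_cases h : P line = true
    · simp [h, pvOr, List.find?]
    · have h' : P line = false := by simpa using h
      simp [List.find?, h', pvOr]

theorem pvLoopA_eq (lines : List String) (q i : Option String) :
    pvLoopA lines q i
      = (pvOr q (List.find? pvIsQuestionB lines), pvOr i (List.find? pvIsInstructionB lines)) := by
  induction lines generalizing q i with
  | nil => cases q <;> cases i <;> rfl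
  | cons line rest ih =>
    set q' := if q.isNone && pvIsQuestionB line then some line else q with hq'
    set i' := if i.isNone && pvIsInstructionB line then some line else i with hi'
    have hstep : pvLoopA (line :: rest) q i =
        if pvTruthyA q' && pvTruthyA i' then (q', i') else pvLoopA rest q' i' := rfl
    rw [hstep]
    have hQ : pvOr q' (List.find? pvIsQuestionB rest)
        = pvOr q (List.find? pvIsQuestionB (line :: rest)) := pvStep _ q line rest
    have hI : pvOr i' (List.find? pvIsInstructionB rest)
        = pvOr i (List.find? pvIsInstructionB (line :: rest)) := pvStep _ i line rest
    by_cases hb : (pvTruthyA q' && pvTruthyA i') = true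
    · rw [if_pos hb]
      have hqs : q'.isSome := pvIsSome_of_truthy ((Bool.and_eq_true _ _).mp hb).1
      have his : i'.isSome := pvIsSome_of_truthy ((Bool.and_eq_true _ _).mp hb).2
      rw [← hQ, ← hI, pvOr_of_isSome _ hqs, pvOr_of_isSome _ his]
    · rw [if_neg hb, ih, hQ, hI]

-- ===== VERDICT (by name: the statement is the Claim_ definition above) =====
theorem extract_question_and_instructions_py_spec : Claim_equal_extract_question_and_instructions_py := by
  intro text _
  unfold Spec_extract_question_and_instructions_py extract_question_and_instructions_py
    extract_question_and_instructions_py_alt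
  simp only []
  rw [pvLoopA_eq]
  rfl
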